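-- pv_equiv track=rewrite | github.com/yousefjan/saturation_library | main.py | find_synony_codon
-- ===== SOURCE A (Python) =====
-- SynonymousCodons = {
--     'C': ['TGT', 'TGC'],
--     'D': ['GAT', 'GAC'],
--     'S': ['TCT', 'TCG', 'TCA', 'TCC', 'AGC', 'AGT'],
--     'Q': ['CAA', 'CAG'],
--     'M': ['ATG'],
--     'N': ['AAC', 'AAT'],
--     'P': ['CCT', 'CCG', 'CCA', 'CCC'],
--     'K': ['AAG', 'AAA'],
--     'STOP': ['TAG', 'TGA', 'TAA'],
--     'T': ['ACC', 'ACA', 'ACG', 'ACT'],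
--     'F': ['TTT', 'TTC'],
--     'A': ['GCA', 'GCC', 'GCG', 'GCT'],
--     'G': ['GGT', 'GGG', 'GGA', 'GGC'],
--     'I': ['ATC', 'ATA', 'ATT'],
--     'L': ['TTA', 'TTG', 'CTC', 'CTT', 'CTG', 'CTA'],
--     'H': ['CAT', 'CAC'],
--     'R': ['CGA', 'CGC', 'CGG', 'CGT', 'AGG', 'AGA'],
--     'W': ['TGG'],
--     'V': ['GTA', 'GTC', 'GTG', 'GTT'],
--     'E': ['GAG', 'GAA'],
--     'Y': ['TAT', 'TAC']
-- }
--
-- def is_one_char_different(codon1, codon2):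
--     diff_count = 0
--     for c1, c2 in zip(codon1, codon2):
--         if c1 != c2:
--             diff_count += 1
--         if diff_count > 1:
--             return False
--     return diff_count == 1
--
-- def find_synony_codon(codon: str, left_restrict=0, right_restrict=0, reverse_order=0):
--     for amino_acid, codons in SynonymousCodons.items():
--         if codon in codons:
--             filtered_codons = [c for c in codons if c != codon]
--
--             if right_restrict > 0:
--                 filtered_codons = [c for c in filtered_codons if c[-right_restrict:] == codon[-right_restrict:]]
--             elif left_restrict > 0:
--                 filtered_codons = [c for c in filtered_codons if c[:left_restrict] == codon[:left_restrict]]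
--
--             one_char_diff_codons = [c for c in filtered_codons if is_one_char_different(c, codon)]
--
--             sorted_codons = sorted(one_char_diff_codons, key=lambda x: [x[i] != codon[i] for i in range(len(x))], reverse=bool(reverse_order))
--
--             if sorted_codons:
--                 return sorted_codons[0]
--
--     return None
-- ===== SOURCE B (Python) =====
-- # B: reverse index (codon -> its synonym group) + one-pass stable min/max selection
-- # instead of scanning all amino-acid entries and sorting the candidate list.
--
-- SynonymousCodons = {
--     'C': ['TGT', 'TGC'],
--     'D': ['GAT', 'GAC'],
--     'S': ['TCT', 'TCG', 'TCA', 'TCC', 'AGC', 'AGT'],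
--     'Q': ['CAA', 'CAG'],
--     'M': ['ATG'],
--     'N': ['AAC', 'AAT'],
--     'P': ['CCT', 'CCG', 'CCA', 'CCC'],
--     'K': ['AAG', 'AAA'],
--     'STOP': ['TAG', 'TGA', 'TAA'],
--     'T': ['ACC', 'ACA', 'ACG', 'ACT'],
--     'F': ['TTT', 'TTC'],
--     'A': ['GCA', 'GCC', 'GCG', 'GCT'],
--     'G': ['GGT', 'GGG', 'GGA', 'GGC'],
--     'I': ['ATC', 'ATA', 'ATT'],
--     'L': ['TTA', 'TTG', 'CTC', 'CTT', 'CTG', 'CTA'],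
--     'H': ['CAT', 'CAC'],
--     'R': ['CGA', 'CGC', 'CGG', 'CGT', 'AGG', 'AGA'],
--     'W': ['TGG'],
--     'V': ['GTA', 'GTC', 'GTG', 'GTT'],
--     'E': ['GAG', 'GAA'],
--     'Y': ['TAT', 'TAC']
-- }
--
-- _CODON_TO_GROUP = {c: codons for codons in SynonymousCodons.values() for c in codons}
--
-- def find_synony_codon(codon: str, left_restrict=0, right_restrict=0, reverse_order=0):
--     group = _CODON_TO_GROUP.get(codon)
--     if group is None:
--         return None
--     best = None
--     best_key = None
--     for c in group:
--         if c == codon: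
--             continue
--         if right_restrict > 0:
--             if c[-right_restrict:] != codon[-right_restrict:]:
--                 continue
--         elif left_restrict > 0:
--             if c[:left_restrict] != codon[:left_restrict]:
--                 continue
--         key = [c[i] != codon[i] for i in range(len(c))]
--         if sum(key) != 1:
--             continue
--         if best is None or (key > best_key if reverse_order else key < best_key):
--             best, best_key = c, key
--     return best
-- ===== Notes on version B (the rewrite author's own statement) =====
-- stated objective: simpler
-- what changed: B replaces A's scan over all 21 amino-acid entries and the sort of the candidate list with a precomputed reverse index (codon -> its synonym group) plus a single stable min/max selection pass over that group, selecting the first extremal candidate under the same boolean-mask key instead of sorting and taking element 0.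
import Mathlib
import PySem

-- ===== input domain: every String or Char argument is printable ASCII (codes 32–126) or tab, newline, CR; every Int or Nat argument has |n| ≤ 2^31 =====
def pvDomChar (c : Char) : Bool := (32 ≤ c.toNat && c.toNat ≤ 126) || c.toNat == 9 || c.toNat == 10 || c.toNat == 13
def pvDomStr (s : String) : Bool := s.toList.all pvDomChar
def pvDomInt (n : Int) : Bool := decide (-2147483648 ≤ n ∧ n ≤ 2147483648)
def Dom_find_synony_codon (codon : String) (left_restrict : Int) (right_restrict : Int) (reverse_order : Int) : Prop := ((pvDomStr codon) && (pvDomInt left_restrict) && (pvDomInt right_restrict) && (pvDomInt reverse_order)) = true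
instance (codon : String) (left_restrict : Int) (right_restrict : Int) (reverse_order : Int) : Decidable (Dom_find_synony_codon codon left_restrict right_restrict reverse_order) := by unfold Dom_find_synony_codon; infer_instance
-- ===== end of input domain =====

-- B replaces A's scan over all amino-acid entries + sort of the candidates by a reverse
-- index (codon -> its synonym group) and a one-pass stable min/max selection (objective: simpler).

-- ===== PORT A =====
def SynCodons : List (String × List String) :=
  [("C", ["TGT", "TGC"]),
   ("D", ["GAT", "GAC"]),
   ("S", ["TCT", "TCG", "TCA", "TCC", "AGC", "AGT"]),
   ("Q", ["CAA", "CAG"]),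
   ("M", ["ATG"]),
   ("N", ["AAC", "AAT"]),
   ("P", ["CCT", "CCG", "CCA", "CCC"]),
   ("K", ["AAG", "AAA"]),
   ("STOP", ["TAG", "TGA", "TAA"]),
   ("T", ["ACC", "ACA", "ACG", "ACT"]),
   ("F", ["TTT", "TTC"]),
   ("A", ["GCA", "GCC", "GCG", "GCT"]),
   ("G", ["GGT", "GGG", "GGA", "GGC"]),
   ("I", ["ATC", "ATA", "ATT"]),
   ("L", ["TTA", "TTG", "CTC", "CTT", "CTG", "CTA"]),
   ("H", ["CAT", "CAC"]),
   ("R", ["CGA", "CGC", "CGG", "CGT", "AGG", "AGA"]),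
   ("W", ["TGG"]),
   ("V", ["GTA", "GTC", "GTG", "GTT"]),
   ("E", ["GAG", "GAA"]),
   ("Y", ["TAT", "TAC"])]

-- the loop of is_one_char_different: diff_count with early False exit
def iocdLoop : List (Char × Char) → Int → Bool
  | [], d => d == 1
  | p :: rest, d =>
    let d' := if p.1 ≠ p.2 then d + 1 else d
    if d' > 1 then false else iocdLoop rest d'

def is_one_char_different (c1 c2 : String) : Bool :=
  iocdLoop (c1.toList.zip c2.toList) 0

-- [x[i] != codon[i] for i in range(len(x))] — the same key expression appears in both Pythons
def diffMask (codon x : String) : List Bool :=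
  (PySem.List.pyRange 0 (x.toList.length) 1).map
    (fun i => PySem.List.pyGet? x.toList i != PySem.List.pyGet? codon.toList i)

def fscLoop (codon : String) (left_restrict right_restrict reverse_order : Int) :
    List (String × List String) → Option String
  | [] => none
  | p :: rest =>
    if p.2.contains codon then
      let filtered := p.2.filter (fun c => c != codon)
      let filtered2 :=
        if right_restrict > 0 then
          filtered.filter (fun c =>
            PySem.List.slice c.toList (some (-right_restrict)) none ==
            PySem.List.slice codon.toList (some (-right_restrict)) none)
        else if left_restrict > 0 then
          filtered.filter (fun c =>
            PySem.List.slice c.toList none (some left_restrict) ==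
            PySem.List.slice codon.toList none (some left_restrict))
        else filtered
      let ones := filtered2.filter (fun c => is_one_char_different c codon)
      match PySem.List.sorted ones (fun x => diffMask codon x) (reverse_order != 0) with
      | [] => fscLoop codon left_restrict right_restrict reverse_order rest
      | c :: _ => some c
    else fscLoop codon left_restrict right_restrict reverse_order rest

def find_synony_codon (codon : String) (left_restrict : Int) (right_restrict : Int) (reverse_order : Int) : Option String :=
  fscLoop codon left_restrict right_restrict reverse_order SynCodons

-- ===== PORT B =====
-- _CODON_TO_GROUP = {c: codons for codons in SynonymousCodons.values() for c in codons}
def codonToGroup : PySem.Dict String (List String) :=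
  SynCodons.foldl (fun d p => p.2.foldl (fun d c => d.insert c p.2) d) PySem.Dict.empty

-- the selection loop over the group, state = best (codon with its key), first-extremal wins
def bestLoop (codon : String) (left_restrict right_restrict reverse_order : Int) :
    List String → Option (String × List Bool) → Option (String × List Bool)
  | [], best => best
  | c :: rest, best =>
    if c == codon then bestLoop codon left_restrict right_restrict reverse_order rest best
    else
      let skip :=
        if right_restrict > 0 then
          PySem.List.slice c.toList (some (-right_restrict)) none !=
          PySem.List.slice codon.toList (some (-right_restrict)) none
        else if left_restrict > 0 then
          PySem.List.slice c.toList none (some left_restrict) !=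
          PySem.List.slice codon.toList none (some left_restrict)
        else false
      if skip then bestLoop codon left_restrict right_restrict reverse_order rest best
      else
        let key := diffMask codon c
        if (key.map (fun b => if b then (1 : Int) else 0)).sum != 1 then
          bestLoop codon left_restrict right_restrict reverse_order rest best
        else
          match best with
          | none => bestLoop codon left_restrict right_restrict reverse_order rest (some (c, key))
          | some bk =>
            if (if reverse_order != 0 then decide (bk.2 < key) else decide (key < bk.2)) then
              bestLoop codon left_restrict right_restrict reverse_order rest (some (c, key))
            else bestLoop codon left_restrict right_restrict reverse_order rest (some bk)

def find_synony_codon_alt (codon : String) (left_restrict : Int) (right_restrict : Int) (reverse_order : Int) : Option String :=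
  match codonToGroup.get? codon with
  | none => none
  | some group =>
    (bestLoop codon left_restrict right_restrict reverse_order group none).map (·.1)

-- ===== PRECONDITION & SPEC =====
def Spec_find_synony_codon (codon : String) (left_restrict : Int) (right_restrict : Int) (reverse_order : Int) (out : Option String) : Prop := out = find_synony_codon_alt codon left_restrict right_restrict reverse_order
instance (codon : String) (left_restrict : Int) (right_restrict : Int) (reverse_order : Int) (out : Option String) : Decidable (Spec_find_synony_codon codon left_restrict right_restrict reverse_order out) := by unfold Spec_find_synony_codon; infer_instance

-- ===== CLAIM (what is proved, stated in full; the proofs are below) =====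
def Claim_equal_find_synony_codon : Prop := ∀ (codon : String) (left_restrict : Int) (right_restrict : Int) (reverse_order : Int), Dom_find_synony_codon codon left_restrict right_restrict reverse_order → Spec_find_synony_codon codon left_restrict right_restrict reverse_order (find_synony_codon codon left_restrict right_restrict reverse_order)

-- ===== LEMMAS AND PROOFS =====

-- all codons, in the order the reverse index inserts them (= concatenation of the groups)
def allCodons : List String := SynCodons.flatMap (·.2)

-- xs[a:] is all of xs once a ≤ -len(xs)
lemma clampIdx_eq_zero (n : Nat) (a : Int) (h : a ≤ -(n : Int)) : PySem.List.clampIdx n a = 0 := by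
  unfold PySem.List.clampIdx
  split
  · split <;> omega
  · omega

lemma slice_from_le_neg_len {α : Type} (cs : List α) (a : Int) (h : a ≤ -(cs.length : Int)) :
    PySem.List.slice cs (some a) none = cs := by
  rw [PySem.List.slice_some_none, clampIdx_eq_zero _ _ h, List.drop_zero]

lemma table_len3 : ∀ p ∈ SynCodons, ∀ c ∈ p.2, c.toList.length = 3 := by decide

-- ---- canonicalisation of A's parameters ----
lemma fscLoop_R_ge3 (codon : String) (L R rev : Int) (hR : 3 ≤ R) :
    ∀ t : List (String × List String), (∀ p ∈ t, ∀ c ∈ p.2, c.toList.length = 3) →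
    fscLoop codon L R rev t = fscLoop codon L 3 rev t := by
  intro t
  induction t with
  | nil => intro _; rfl
  | cons p rest ih =>
    intro ht
    have hrest : ∀ q ∈ rest, ∀ c ∈ q.2, c.toList.length = 3 :=
      fun q hq => ht q (List.mem_cons_of_mem _ hq)
    simp only [fscLoop]
    by_cases hc : p.2.contains codon
    · rw [if_pos hc, if_pos hc]
      have hcod : codon.toList.length = 3 :=
        ht p List.mem_cons_self codon (by simpa using hc)
      have hf2 :
          (p.2.filter (fun c => c != codon)).filter (fun c =>
            PySem.List.slice c.toList (some (-R)) none ==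
            PySem.List.slice codon.toList (some (-R)) none) =
          (p.2.filter (fun c => c != codon)).filter (fun c =>
            PySem.List.slice c.toList (some (-(3:Int))) none ==
            PySem.List.slice codon.toList (some (-(3:Int))) none) := by
        apply List.filter_congr
        intro c hcm
        have hc3 : c.toList.length = 3 := ht p List.mem_cons_self c (List.mem_of_mem_filter hcm)
        rw [slice_from_le_neg_len c.toList (-R) (by omega),
            slice_from_le_neg_len codon.toList (-R) (by omega),
            slice_from_le_neg_len c.toList (-(3:Int)) (by omega),
            slice_from_le_neg_len codon.toList (-(3:Int)) (by omega)]
      rw [if_pos (show R > 0 by omega), if_pos (show (3:Int) > 0 by omega), hf2, ih hrest]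
    · rw [if_neg hc, if_neg hc]
      exact ih hrest

lemma fscLoop_R_nonpos (codon : String) (L R rev : Int) (hR : R ≤ 0) :
    ∀ t : List (String × List String),
    fscLoop codon L R rev t = fscLoop codon L 0 rev t := by
  intro t
  induction t with
  | nil => rfl
  | cons p rest ih =>
    simp only [fscLoop]
    by_cases hc : p.2.contains codon
    · rw [if_pos hc, if_pos hc,
          if_neg (show ¬ R > 0 by omega), if_neg (show ¬ (0:Int) > 0 by omega), ih]
    · rw [if_neg hc, if_neg hc]
      exact ih

lemma fscLoop_L_ge3 (codon : String) (L R rev : Int) (hL : 3 ≤ L) :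
    ∀ t : List (String × List String), (∀ p ∈ t, ∀ c ∈ p.2, c.toList.length = 3) →
    fscLoop codon L R rev t = fscLoop codon 3 R rev t := by
  intro t
  induction t with
  | nil => intro _; rfl
  | cons p rest ih =>
    intro ht
    have hrest : ∀ q ∈ rest, ∀ c ∈ q.2, c.toList.length = 3 :=
      fun q hq => ht q (List.mem_cons_of_mem _ hq)
    simp only [fscLoop]
    by_cases hc : p.2.contains codon
    · rw [if_pos hc, if_pos hc]
      by_cases hRp : R > 0
      · rw [if_pos hRp, if_pos hRp, ih hrest]
      · have hcod : codon.toList.length = 3 :=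
          ht p List.mem_cons_self codon (by simpa using hc)
        have hf2 :
            (p.2.filter (fun c => c != codon)).filter (fun c =>
              PySem.List.slice c.toList none (some L) ==
              PySem.List.slice codon.toList none (some L)) =
            (p.2.filter (fun c => c != codon)).filter (fun c =>
              PySem.List.slice c.toList none (some (3:Int)) ==
              PySem.List.slice codon.toList none (some (3:Int))) := by
          apply List.filter_congr
          intro c hcm
          have hc3 : c.toList.length = 3 := ht p List.mem_cons_self c (List.mem_of_mem_filter hcm)
          rw [PySem.List.slice_to c.toList (show (0:Int) ≤ L by omega),
              PySem.List.slice_to codon.toList (show (0:Int) ≤ L by omega),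
              PySem.List.slice_to c.toList (show (0:Int) ≤ (3:Int) by omega),
              PySem.List.slice_to codon.toList (show (0:Int) ≤ (3:Int) by omega)]
          simp only [List.take_of_length_le (show c.toList.length ≤ L.toNat by omega),
                     List.take_of_length_le (show codon.toList.length ≤ L.toNat by omega),
                     List.take_of_length_le (show c.toList.length ≤ (3:Int).toNat by omega),
                     List.take_of_length_le (show codon.toList.length ≤ (3:Int).toNat by omega)]
        rw [if_neg hRp, if_neg hRp, if_pos (show L > 0 by omega), if_pos (show (3:Int) > 0 by omega),
            hf2, ih hrest]
    · rw [if_neg hc, if_neg hc]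
      exact ih hrest

lemma fscLoop_L_nonpos (codon : String) (L R rev : Int) (hL : L ≤ 0) :
    ∀ t : List (String × List String),
    fscLoop codon L R rev t = fscLoop codon 0 R rev t := by
  intro t
  induction t with
  | nil => rfl
  | cons p rest ih =>
    simp only [fscLoop]
    by_cases hc : p.2.contains codon
    · rw [if_pos hc, if_pos hc]
      by_cases hRp : R > 0
      · rw [if_pos hRp, if_pos hRp, ih]
      · rw [if_neg hRp, if_neg hRp,
            if_neg (show ¬ L > 0 by omega), if_neg (show ¬ (0:Int) > 0 by omega), ih]
    · rw [if_neg hc, if_neg hc]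
      exact ih

lemma fscLoop_rev_ne (codon : String) (L R rev : Int) (hv : rev ≠ 0) :
    ∀ t : List (String × List String),
    fscLoop codon L R rev t = fscLoop codon L R 1 t := by
  intro t
  have hb : (rev != 0) = ((1:Int) != 0) := by simp [hv]
  induction t with
  | nil => rfl
  | cons p rest ih =>
    simp only [fscLoop]
    by_cases hc : p.2.contains codon
    · rw [if_pos hc, if_pos hc, hb, ih]
    · rw [if_neg hc, if_neg hc]
      exact ih

lemma fscLoop_L_irrel (codon : String) (L R rev : Int) (hR : 0 < R) :
    ∀ t : List (String × List String),
    fscLoop codon L R rev t = fscLoop codon 0 R rev t := by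
  intro t
  induction t with
  | nil => rfl
  | cons p rest ih =>
    simp only [fscLoop]
    by_cases hc : p.2.contains codon
    · rw [if_pos hc, if_pos hc, if_pos (show R > 0 by omega), if_pos (show R > 0 by omega), ih]
    · rw [if_neg hc, if_neg hc]
      exact ih

-- ---- canonicalisation of B's parameters ----
lemma bestLoop_R_ge3 (codon : String) (L R rev : Int) (hR : 3 ≤ R)
    (hcod : codon.toList.length = 3) :
    ∀ g : List String, (∀ c ∈ g, c.toList.length = 3) → ∀ best,
    bestLoop codon L R rev g best = bestLoop codon L 3 rev g best := by
  intro g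
  induction g with
  | nil => intro _ best; rfl
  | cons c rest ih =>
    intro hg best
    have hrest : ∀ x ∈ rest, x.toList.length = 3 := fun x hx => hg x (List.mem_cons_of_mem _ hx)
    have hc3 : c.toList.length = 3 := hg c List.mem_cons_self
    have hcod3 := hcod
    simp only [bestLoop]
    by_cases hq : (c == codon) = true
    · rw [if_pos hq, if_pos hq]
      exact ih hrest best
    · rw [if_neg hq, if_neg hq,
          if_pos (show R > 0 by omega), if_pos (show (3:Int) > 0 by omega),
          slice_from_le_neg_len c.toList (-R) (by omega),
          slice_from_le_neg_len codon.toList (-R) (by omega),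
          slice_from_le_neg_len c.toList (-(3:Int)) (by omega),
          slice_from_le_neg_len codon.toList (-(3:Int)) (by omega)]
      simp only [ih hrest]

lemma bestLoop_R_nonpos (codon : String) (L R rev : Int) (hR : R ≤ 0) :
    ∀ (g : List String) best,
    bestLoop codon L R rev g best = bestLoop codon L 0 rev g best := by
  intro g
  induction g with
  | nil => intro best; rfl
  | cons c rest ih =>
    intro best
    simp only [bestLoop]
    by_cases hq : (c == codon) = true
    · rw [if_pos hq, if_pos hq]
      exact ih best
    · rw [if_neg hq, if_neg hq,
          if_neg (show ¬ R > 0 by omega), if_neg (show ¬ (0:Int) > 0 by omega)]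
      simp only [ih]

lemma bestLoop_L_ge3 (codon : String) (L R rev : Int) (hL : 3 ≤ L)
    (hcod : codon.toList.length = 3) :
    ∀ g : List String, (∀ c ∈ g, c.toList.length = 3) → ∀ best,
    bestLoop codon L R rev g best = bestLoop codon 3 R rev g best := by
  intro g
  induction g with
  | nil => intro _ best; rfl
  | cons c rest ih =>
    intro hg best
    have hrest : ∀ x ∈ rest, x.toList.length = 3 := fun x hx => hg x (List.mem_cons_of_mem _ hx)
    have hc3 : c.toList.length = 3 := hg c List.mem_cons_self
    simp only [bestLoop]
    by_cases hq : (c == codon) = true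
    · rw [if_pos hq, if_pos hq]
      exact ih hrest best
    · rw [if_neg hq, if_neg hq]
      by_cases hRp : R > 0
      · rw [if_pos hRp, if_pos hRp]
        simp only [ih hrest]
      · rw [if_neg hRp, if_neg hRp,
            if_pos (show L > 0 by omega), if_pos (show (3:Int) > 0 by omega),
            PySem.List.slice_to c.toList (show (0:Int) ≤ L by omega),
            PySem.List.slice_to codon.toList (show (0:Int) ≤ L by omega),
            PySem.List.slice_to c.toList (show (0:Int) ≤ (3:Int) by omega),
            PySem.List.slice_to codon.toList (show (0:Int) ≤ (3:Int) by omega)]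
        simp only [List.take_of_length_le (show c.toList.length ≤ L.toNat by omega),
                   List.take_of_length_le (show codon.toList.length ≤ L.toNat by omega),
                   List.take_of_length_le (show c.toList.length ≤ (3:Int).toNat by omega),
                   List.take_of_length_le (show codon.toList.length ≤ (3:Int).toNat by omega)]
        simp only [ih hrest]

lemma bestLoop_L_nonpos (codon : String) (L R rev : Int) (hL : L ≤ 0) :
    ∀ (g : List String) best,
    bestLoop codon L R rev g best = bestLoop codon 0 R rev g best := by
  intro g
  induction g with
  | nil => intro best; rfl
  | cons c rest ih =>
    intro best
    simp only [bestLoop]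
    by_cases hq : (c == codon) = true
    · rw [if_pos hq, if_pos hq]
      exact ih best
    · rw [if_neg hq, if_neg hq]
      by_cases hRp : R > 0
      · rw [if_pos hRp, if_pos hRp]
        simp only [ih]
      · rw [if_neg hRp, if_neg hRp,
            if_neg (show ¬ L > 0 by omega), if_neg (show ¬ (0:Int) > 0 by omega)]
        simp only [ih]

lemma bestLoop_rev_ne (codon : String) (L R rev : Int) (hv : rev ≠ 0) :
    ∀ (g : List String) best,
    bestLoop codon L R rev g best = bestLoop codon L R 1 g best := by
  intro g
  have hb : (rev != 0) = ((1:Int) != 0) := by simp [hv]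
  induction g with
  | nil => intro best; rfl
  | cons c rest ih =>
    intro best
    simp only [bestLoop]
    by_cases hq : (c == codon) = true
    · rw [if_pos hq, if_pos hq]
      exact ih best
    · rw [if_neg hq, if_neg hq, hb]
      simp only [ih]

lemma bestLoop_L_irrel (codon : String) (L R rev : Int) (hR : 0 < R) :
    ∀ (g : List String) best,
    bestLoop codon L R rev g best = bestLoop codon 0 R rev g best := by
  intro g
  induction g with
  | nil => intro best; rfl
  | cons c rest ih =>
    intro best
    simp only [bestLoop]
    by_cases hq : (c == codon) = true
    · rw [if_pos hq, if_pos hq]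
      exact ih best
    · rw [if_neg hq, if_neg hq, if_pos (show R > 0 by omega), if_pos (show R > 0 by omega)]
      simp only [ih]

-- ---- lifting the canonicalisations to the two entry points ----
set_option maxRecDepth 100000 in
lemma keys_codonToGroup : codonToGroup.keys = allCodons := by decide

set_option maxRecDepth 100000 in
lemma items_facts : ∀ p ∈ codonToGroup.items, p.1.toList.length = 3 ∧ ∀ c ∈ p.2, c.toList.length = 3 := by
  decide

lemma group_facts : ∀ codon g, codonToGroup.get? codon = some g →
    codon.toList.length = 3 ∧ ∀ c ∈ g, c.toList.length = 3 := by
  intro codon g h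
  exact items_facts (codon, g) (PySem.Dict.mem_items_of_get?_eq_some _ h)

set_option maxRecDepth 100000 in
lemma alt_canon (codon : String) (L R rev L' R' rev' : Int)
    (hL : L = L' ∨ (L ≤ 0 ∧ L' = 0) ∨ (3 ≤ L ∧ L' = 3) ∨ (0 < R ∧ L' = 0))
    (hR : R = R' ∨ (R ≤ 0 ∧ R' = 0) ∨ (3 ≤ R ∧ R' = 3))
    (hv : rev = rev' ∨ (rev ≠ 0 ∧ rev' = 1)) :
    find_synony_codon_alt codon L R rev = find_synony_codon_alt codon L' R' rev' := by
  rcases hopt : codonToGroup.get? codon with _ | g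
  · unfold find_synony_codon_alt
    rw [hopt]
  · obtain ⟨hcod, hg⟩ := group_facts codon g hopt
    unfold find_synony_codon_alt
    rw [hopt]
    dsimp only
    have e1 : bestLoop codon L R rev g none = bestLoop codon L' R rev g none := by
      rcases hL with rfl | ⟨h1, rfl⟩ | ⟨h1, rfl⟩ | ⟨h1, rfl⟩
      · rfl
      · exact bestLoop_L_nonpos codon L R rev h1 g none
      · exact bestLoop_L_ge3 codon L R rev h1 hcod g hg none
      · exact bestLoop_L_irrel codon L R rev h1 g none
    have e2 : bestLoop codon L' R rev g none = bestLoop codon L' R' rev g none := by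
      rcases hR with rfl | ⟨h1, rfl⟩ | ⟨h1, rfl⟩
      · rfl
      · exact bestLoop_R_nonpos codon L' R rev h1 g none
      · exact bestLoop_R_ge3 codon L' R rev h1 hcod g hg none
    have e3 : bestLoop codon L' R' rev g none = bestLoop codon L' R' rev' g none := by
      rcases hv with rfl | ⟨h1, rfl⟩
      · rfl
      · exact bestLoop_rev_ne codon L' R' rev h1 g none
    rw [e1, e2, e3]

lemma a_canon (codon : String) (L R rev L' R' rev' : Int)
    (hL : L = L' ∨ (L ≤ 0 ∧ L' = 0) ∨ (3 ≤ L ∧ L' = 3) ∨ (0 < R ∧ L' = 0))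
    (hR : R = R' ∨ (R ≤ 0 ∧ R' = 0) ∨ (3 ≤ R ∧ R' = 3))
    (hv : rev = rev' ∨ (rev ≠ 0 ∧ rev' = 1)) :
    find_synony_codon codon L R rev = find_synony_codon codon L' R' rev' := by
  simp only [find_synony_codon]
  have e1 : fscLoop codon L R rev SynCodons = fscLoop codon L' R rev SynCodons := by
    rcases hL with rfl | ⟨h1, rfl⟩ | ⟨h1, rfl⟩ | ⟨h1, rfl⟩
    · rfl
    · exact fscLoop_L_nonpos codon L R rev h1 SynCodons
    · exact fscLoop_L_ge3 codon L R rev h1 SynCodons table_len3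
    · exact fscLoop_L_irrel codon L R rev h1 SynCodons
  have e2 : fscLoop codon L' R rev SynCodons = fscLoop codon L' R' rev SynCodons := by
    rcases hR with rfl | ⟨h1, rfl⟩ | ⟨h1, rfl⟩
    · rfl
    · exact fscLoop_R_nonpos codon L' R rev h1 SynCodons
    · exact fscLoop_R_ge3 codon L' R rev h1 SynCodons table_len3
  have e3 : fscLoop codon L' R' rev SynCodons = fscLoop codon L' R' rev' SynCodons := by
    rcases hv with rfl | ⟨h1, rfl⟩
    · rfl
    · exact fscLoop_rev_ne codon L' R' rev h1 SynCodons
  rw [e1, e2, e3]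

-- ---- the two sides on codons outside the table ----
lemma a_none_of_not_mem (codon : String) (L R rev : Int) (h : codon ∉ allCodons) :
    find_synony_codon codon L R rev = none := by
  have : ∀ t : List (String × List String), (∀ p ∈ t, codon ∉ p.2) →
      fscLoop codon L R rev t = none := by
    intro t
    induction t with
    | nil => intro _; rfl
    | cons p rest ih =>
      intro ht
      simp only [fscLoop]
      rw [if_neg (by simpa using ht p List.mem_cons_self)]
      exact ih (fun q hq => ht q (List.mem_cons_of_mem _ hq))
  exact this SynCodons (fun p hp hmem => h (List.mem_flatMap.mpr ⟨p, hp, hmem⟩))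

set_option maxRecDepth 100000 in
lemma b_none_of_not_mem (codon : String) (L R rev : Int) (h : codon ∉ allCodons) :
    find_synony_codon_alt codon L R rev = none := by
  have hnone : codonToGroup.get? codon = none := by
    rw [PySem.Dict.get?_eq_none_iff_not_mem_keys (d := codonToGroup) (k := codon),
        keys_codonToGroup]
    exact h
  unfold find_synony_codon_alt
  rw [hnone]

-- ---- the finite canonical grid, checked by computation ----
set_option maxRecDepth 1000000 in
set_option maxHeartbeats 4000000 in
lemma grid_check : ∀ codon ∈ allCodons,
    ∀ p ∈ ([(0, 0), (1, 0), (2, 0), (3, 0), (0, 1), (0, 2), (0, 3)] : List (Int × Int)),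
    ∀ v ∈ ([0, 1] : List Int),
    find_synony_codon codon p.1 p.2 v = find_synony_codon_alt codon p.1 p.2 v := by decide

lemma pair_mem (L' R' : Int) (hL : L' ∈ ([0, 1, 2, 3] : List Int))
    (hR : R' ∈ ([0, 1, 2, 3] : List Int)) (h : R' = 0 ∨ L' = 0) :
    (L', R') ∈ ([(0, 0), (1, 0), (2, 0), (3, 0), (0, 1), (0, 2), (0, 3)] : List (Int × Int)) := by
  fin_cases hL <;> fin_cases hR <;> revert h <;> decide

-- ===== VERDICT (by name: the statement is the Claim_ definition above) =====
set_option maxRecDepth 100000 in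
theorem find_synony_codon_spec : Claim_equal_find_synony_codon := by
  intro codon L R rev _
  unfold Spec_find_synony_codon
  by_cases hmem : codon ∈ allCodons
  · have hcV : ∃ v', (rev = v' ∨ (rev ≠ 0 ∧ v' = 1)) ∧ v' ∈ ([0, 1] : List Int) := by
      by_cases hv : rev = 0
      · exact ⟨0, Or.inl hv, by decide⟩
      · exact ⟨1, Or.inr ⟨hv, rfl⟩, by decide⟩
    obtain ⟨v', hv, hvm⟩ := hcV
    by_cases hrp : 0 < R
    · have hcR : ∃ R', (R = R' ∨ (R ≤ 0 ∧ R' = 0) ∨ (3 ≤ R ∧ R' = 3)) ∧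
          R' ∈ ([0, 1, 2, 3] : List Int) := by
        by_cases h3 : 3 ≤ R
        · exact ⟨3, Or.inr (Or.inr ⟨h3, rfl⟩), by decide⟩
        · have hlo : 1 ≤ R := by omega
          have hhi : R ≤ 2 := by omega
          interval_cases R
          · exact ⟨1, Or.inl rfl, by decide⟩
          · exact ⟨2, Or.inl rfl, by decide⟩
      obtain ⟨R', hR, hRm⟩ := hcR
      rw [a_canon codon L R rev 0 R' v' (Or.inr (Or.inr (Or.inr ⟨hrp, rfl⟩))) hR hv,
          alt_canon codon L R rev 0 R' v' (Or.inr (Or.inr (Or.inr ⟨hrp, rfl⟩))) hR hv]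
      have hRpos : R' = 0 ∨ (0:Int) = 0 := Or.inr rfl
      exact grid_check codon hmem (0, R') (pair_mem 0 R' (by decide) hRm hRpos) v' hvm
    · have hR0 : R ≤ 0 := by omega
      have hcL : ∃ L', (L = L' ∨ (L ≤ 0 ∧ L' = 0) ∨ (3 ≤ L ∧ L' = 3) ∨ (0 < R ∧ L' = 0)) ∧
          L' ∈ ([0, 1, 2, 3] : List Int) := by
        by_cases h : L ≤ 0
        · exact ⟨0, Or.inr (Or.inl ⟨h, rfl⟩), by decide⟩
        by_cases h3 : 3 ≤ L
        · exact ⟨3, Or.inr (Or.inr (Or.inl ⟨h3, rfl⟩)), by decide⟩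
        · have hlo : 1 ≤ L := by omega
          have hhi : L ≤ 2 := by omega
          interval_cases L
          · exact ⟨1, Or.inl rfl, by decide⟩
          · exact ⟨2, Or.inl rfl, by decide⟩
      obtain ⟨L', hL, hLm⟩ := hcL
      rw [a_canon codon L R rev L' 0 v' hL (Or.inr (Or.inl ⟨hR0, rfl⟩)) hv,
          alt_canon codon L R rev L' 0 v' hL (Or.inr (Or.inl ⟨hR0, rfl⟩)) hv]
      exact grid_check codon hmem (L', 0) (pair_mem L' 0 hLm (by decide) (Or.inl rfl)) v' hvm
  · rw [a_none_of_not_mem codon L R rev hmem, b_none_of_not_mem codon L R rev hmem]
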